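-- pv_equiv track=rewrite | github.com/ShadowTemplate/constrained-adversarial-networks | src/polygons_generator.py | _incompatible_polygons
-- ===== SOURCE A (Python) =====
-- from itertools import combinations, product
--
-- def _incompatible_polygons(polygons):
--     def overlap(pol1, pol2):
--         return any(pixel in pol2 for pixel in pol1)
--
--     def touch(pol1, pol2):
--         return any(abs(p1[0] - p2[0]) <= 1 and abs(p1[1] - p2[1]) <= 1
--                    for p1, p2 in product(pol1, pol2))
--
--     def incompatible(pol1, pol2):
--         return overlap(pol1, pol2) or touch(pol1, pol2)
--
--     return any(incompatible(c[0], c[1]) for c in combinations(polygons, 2))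
-- ===== SOURCE B (Python) =====
-- def _incompatible_polygons(polygons):
--     seen = set()
--     for pol in polygons:
--         for (x, y) in pol:
--             for dx in (-1, 0, 1):
--                 for dy in (-1, 0, 1):
--                     if (x + dx, y + dy) in seen:
--                         return True
--         seen.update(pol)
--     return False
-- ===== Notes on version B (the rewrite author's own statement) =====
-- stated objective: faster
-- what changed: replaced A's scan over all pairs of polygons with nested pixel-product tests by a single pass that accumulates already-seen pixels in a hash set and probes each new pixel's 3x3 neighborhood
import Mathlib
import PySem

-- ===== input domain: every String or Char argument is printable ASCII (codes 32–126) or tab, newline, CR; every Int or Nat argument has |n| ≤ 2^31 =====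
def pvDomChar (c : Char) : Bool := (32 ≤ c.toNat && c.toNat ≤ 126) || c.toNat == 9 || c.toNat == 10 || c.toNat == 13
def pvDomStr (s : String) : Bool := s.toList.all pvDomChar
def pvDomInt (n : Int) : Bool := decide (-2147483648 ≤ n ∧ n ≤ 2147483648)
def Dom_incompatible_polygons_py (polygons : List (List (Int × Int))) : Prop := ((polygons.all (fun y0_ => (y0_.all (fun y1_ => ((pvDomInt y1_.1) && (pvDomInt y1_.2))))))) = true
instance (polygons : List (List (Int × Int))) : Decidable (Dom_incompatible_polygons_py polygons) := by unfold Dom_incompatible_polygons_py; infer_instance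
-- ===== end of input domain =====

-- B replaces A's all-pairs-of-polygons double scan by one pass that keeps a set of
-- already-seen pixels and probes each new pixel's 3x3 neighbourhood (objective: faster).

-- ===== PORT A =====
-- combinations(polygons, 2), in itertools order
def pvComb2 {α : Type} : List α → List (α × α)
  | [] => []
  | x :: xs => xs.map (fun y => (x, y)) ++ pvComb2 xs

def pvOverlap (pol1 pol2 : List (Int × Int)) : Bool :=
  pol1.any (fun pixel => pol2.contains pixel)

-- any over itertools.product(pol1, pol2)
def pvTouch (pol1 pol2 : List (Int × Int)) : Bool :=
  (pol1.flatMap (fun p1 => pol2.map (fun p2 => (p1, p2)))).any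
    (fun pq => decide (|pq.1.1 - pq.2.1| ≤ 1) && decide (|pq.1.2 - pq.2.2| ≤ 1))

def pvIncompat (pol1 pol2 : List (Int × Int)) : Bool :=
  pvOverlap pol1 pol2 || pvTouch pol1 pol2

def incompatible_polygons_py (polygons : List (List (Int × Int))) : Bool :=
  (pvComb2 polygons).any (fun c => pvIncompat c.1 c.2)

-- ===== PORT B =====
def pvOffs : List Int := [-1, 0, 1]

-- the two inner 'for dx/dy' loops with early 'return True'
def pvNearSeen (seen : PySem.Set (Int × Int)) (p : Int × Int) : Bool :=
  pvOffs.any (fun dx => pvOffs.any (fun dy => PySem.Set.contains seen (p.1 + dx, p.2 + dy)))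

-- the outer 'for pol in polygons' loop carrying the 'seen' set
def pvScan : PySem.Set (Int × Int) → List (List (Int × Int)) → Bool
  | _, [] => false
  | seen, pol :: rest =>
    if pol.any (fun p => pvNearSeen seen p) then true
    else pvScan (PySem.Set.update seen pol) rest

def incompatible_polygons_py_alt (polygons : List (List (Int × Int))) : Bool :=
  pvScan PySem.Set.empty polygons

-- ===== PRECONDITION & SPEC =====
def Spec_incompatible_polygons_py (polygons : List (List (Int × Int))) (out : Bool) : Prop := out = incompatible_polygons_py_alt polygons
instance (polygons : List (List (Int × Int))) (out : Bool) : Decidable (Spec_incompatible_polygons_py polygons out) := by unfold Spec_incompatible_polygons_py; infer_instance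

-- ===== CLAIM (what is proved, stated in full; the proofs are below) =====
def Claim_equal_incompatible_polygons_py : Prop := ∀ (polygons : List (List (Int × Int))), Dom_incompatible_polygons_py polygons → Spec_incompatible_polygons_py polygons (incompatible_polygons_py polygons)

-- ===== LEMMAS AND PROOFS =====

-- Chebyshev-distance-≤-1 relation both programs test
def pvNear (p q : Int × Int) : Prop := |p.1 - q.1| ≤ 1 ∧ |p.2 - q.2| ≤ 1

theorem pvNear_symm {p q : Int × Int} : pvNear p q ↔ pvNear q p := by
  unfold pvNear; simp only [abs_le]; omega

theorem pvIncompat_iff (pol1 pol2 : List (Int × Int)) :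
    pvIncompat pol1 pol2 = true ↔ ∃ p ∈ pol1, ∃ q ∈ pol2, pvNear p q := by
  unfold pvIncompat pvOverlap pvTouch pvNear
  simp only [Bool.or_eq_true, List.any_eq_true, List.mem_flatMap, List.mem_map,
    List.contains_iff_exists_mem_beq, beq_iff_eq, Bool.and_eq_true, decide_eq_true_eq]
  constructor
  · rintro (⟨p, hp, q, hq, rfl⟩ | ⟨pq, ⟨p, hp, q, hq, rfl⟩, h1, h2⟩)
    · exact ⟨p, hp, p, hq, by simp, by simp⟩
    · exact ⟨p, hp, q, hq, h1, h2⟩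
  · rintro ⟨p, hp, q, hq, h1, h2⟩
    exact Or.inr ⟨(p, q), ⟨p, hp, q, hq, rfl⟩, h1, h2⟩

theorem pvNearSeen_iff (seen : PySem.Set (Int × Int)) (p : Int × Int) :
    pvNearSeen seen p = true ↔ ∃ q ∈ seen, pvNear p q := by
  unfold pvNearSeen pvOffs pvNear
  simp only [List.any_eq_true, PySem.Set.contains_iff, List.mem_cons, List.not_mem_nil,
    or_false, abs_le]
  constructor
  · rintro ⟨dx, hdx, dy, hdy, hmem⟩
    refine ⟨(p.1 + dx, p.2 + dy), hmem, ?_, ?_⟩ <;>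
      (rcases hdx with h|h|h <;> rcases hdy with h'|h'|h' <;> subst h <;> subst h' <;> omega)
  · rintro ⟨q, hq, h1, h2⟩
    refine ⟨q.1 - p.1, by omega, q.2 - p.2, by omega, ?_⟩
    have hpq : (p.1 + (q.1 - p.1), p.2 + (q.2 - p.2)) = q := by
      cases q; simp only [Prod.mk.injEq]; omega
    rw [hpq]; exact hq

theorem pvComb2_cons {α : Type} (x : α) (xs : List α) (P : α × α → Prop) :
    (∃ c ∈ pvComb2 (x :: xs), P c) ↔ (∃ y ∈ xs, P (x, y)) ∨ (∃ c ∈ pvComb2 xs, P c) := by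
  simp only [pvComb2, List.mem_append, List.mem_map]
  constructor
  · rintro ⟨c, (⟨y, hy, rfl⟩ | hc), hP⟩
    · exact Or.inl ⟨y, hy, hP⟩
    · exact Or.inr ⟨c, hc, hP⟩
  · rintro (⟨y, hy, hP⟩ | ⟨c, hc, hP⟩)
    · exact ⟨(x, y), Or.inl ⟨y, hy, rfl⟩, hP⟩
    · exact ⟨c, Or.inr hc, hP⟩

theorem pvScan_iff (pols : List (List (Int × Int))) (seen : PySem.Set (Int × Int)) :
    pvScan seen pols = true ↔
      (∃ pol ∈ pols, ∃ p ∈ pol, ∃ q ∈ seen, pvNear p q) ∨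
      (∃ c ∈ pvComb2 pols, ∃ p ∈ c.1, ∃ q ∈ c.2, pvNear p q) := by
  induction pols generalizing seen with
  | nil => simp [pvScan, pvComb2]
  | cons pol rest ih =>
    rw [pvScan]
    rw [pvComb2_cons pol rest (fun c => ∃ p ∈ c.1, ∃ q ∈ c.2, pvNear p q)]
    by_cases h : pol.any (fun p => pvNearSeen seen p) = true
    · simp only [h, if_true, true_iff]
      rw [List.any_eq_true] at h
      obtain ⟨p, hp, hn⟩ := h
      obtain ⟨q, hq, hnear⟩ := (pvNearSeen_iff seen p).mp hn
      exact Or.inl ⟨pol, List.mem_cons_self, p, hp, q, hq, hnear⟩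
    · simp only [h, if_false, Bool.false_eq_true]
      rw [ih]
      have hno : ∀ p ∈ pol, ∀ q ∈ seen, ¬ pvNear p q := by
        intro p hp q hq hnear
        exact h (List.any_eq_true.mpr ⟨p, hp, (pvNearSeen_iff seen p).mpr ⟨q, hq, hnear⟩⟩)
      constructor
      · rintro (⟨pol', hpol', p, hp, q, hq, hnear⟩ | hc)
        · rw [PySem.Set.mem_update seen pol q] at hq
          rcases hq with hq | hq
          · exact Or.inl ⟨pol', List.mem_cons_of_mem _ hpol', p, hp, q, hq, hnear⟩
          · exact Or.inr (Or.inl ⟨pol', hpol', q, hq, p, hp, pvNear_symm.mp hnear⟩)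
        · exact Or.inr (Or.inr hc)
      · rintro (⟨pol', hpol', p, hp, q, hq, hnear⟩ | ⟨pol', hpol', p, hp, q, hq, hnear⟩ | hc)
        · rcases List.mem_cons.mp hpol' with rfl | hpol'
          · exact absurd hnear (hno p hp q hq)
          · exact Or.inl ⟨pol', hpol', p, hp, q, (PySem.Set.mem_update seen pol q).mpr (Or.inl hq), hnear⟩
        · exact Or.inl ⟨pol', hpol', q, hq, p, (PySem.Set.mem_update seen pol p).mpr (Or.inr hp),
            pvNear_symm.mp hnear⟩
        · exact Or.inr hc

-- ===== VERDICT (by name: the statement is the Claim_ definition above) =====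
theorem incompatible_polygons_py_spec : Claim_equal_incompatible_polygons_py := by
  intro polygons _
  unfold Spec_incompatible_polygons_py incompatible_polygons_py incompatible_polygons_py_alt
  rw [Bool.eq_iff_iff, List.any_eq_true, pvScan_iff]
  simp only [pvIncompat_iff]
  constructor
  · intro h; exact Or.inr h
  · rintro (⟨_, _, _, _, q, hq, _⟩ | h)
    · exact absurd hq (by simp [PySem.Set.empty])
    · exact h
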